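-- pv_equiv track=rewrite | github.com/FrostyDog8/WordleSolver | WordleSolver/WordleSolver.py | grader
-- ===== SOURCE A (Python) =====
-- def grader(poss_words):
--     grades = []
--     for i in range(5):
--         grades.append([0] * 26)
--     for word in poss_words:
--         for i in range(5):
--             grades[i][ord(word[i]) - ord("a")] += 1
--     return grades
-- ===== SOURCE B (Python) =====
-- def grader(poss_words):
--     grades = []
--     for i in range(5):
--         col = sorted(word[i] for word in poss_words)
--         row = [0] * 26
--         while col:
--             c = col[0]
--             run = 1
--             while run < len(col) and col[run] == c:
--                 run += 1
--             row[ord(c) - ord("a")] += run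
--             col = col[run:]
--         grades.append(row)
--     return grades
-- ===== Notes on version B (the rewrite author's own statement) =====
-- stated objective: alternative
-- what changed: Replaces A's single row-major tally pass (increment a 5x26 table once per word/position pair) by a sort-then-group algorithm: per position the column of letters is sorted, scanned run by run, and each maximal run's length is added to its letter's cell in one update.
import Mathlib
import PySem

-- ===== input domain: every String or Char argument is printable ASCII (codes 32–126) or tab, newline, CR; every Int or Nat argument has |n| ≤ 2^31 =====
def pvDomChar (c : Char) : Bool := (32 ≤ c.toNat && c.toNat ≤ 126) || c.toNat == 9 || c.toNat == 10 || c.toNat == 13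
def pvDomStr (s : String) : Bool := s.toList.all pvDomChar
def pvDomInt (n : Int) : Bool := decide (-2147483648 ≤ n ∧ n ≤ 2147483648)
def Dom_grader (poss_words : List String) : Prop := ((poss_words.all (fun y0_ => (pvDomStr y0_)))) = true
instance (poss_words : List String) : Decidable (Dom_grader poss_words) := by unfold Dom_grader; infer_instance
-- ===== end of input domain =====

-- B replaces A's row-major per-word tally pass by a sort-then-group algorithm: per position the
-- column of letters is sorted and scanned run by run, each maximal run's length added at once.
-- Alternative decomposition; return value only, neither version mutates its input.

-- shared primitive: Python's `row[idx] += v` (negative index wraps; out of range = IndexError,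
-- modelled as the identity and excluded by Pre_)
def pyAdd (xs : List Int) (i : Int) (v : Int) : List Int :=
  match PySem.List.pyIdx? xs.length i with
  | some j => xs.set j (xs.getD j 0 + v)
  | none => xs

-- shared primitive: ord(word[i]) - ord("a")  (word[i] out of range = IndexError, excluded by Pre_)
def ordAt (w : String) (i : Int) : Int :=
  (((PySem.Str.pyGet? w i).getD 'a').toNat : Int) - 97

-- ===== PORT A =====
def grader (poss_words : List String) : List (List Int) :=
  let grades := (PySem.List.pyRange 0 5 1).foldl (fun g _ => g ++ [List.replicate 26 (0 : Int)]) []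
  poss_words.foldl (fun g w =>
    (PySem.List.pyRange 0 5 1).foldl (fun g i =>
      PySem.List.pySetD g i (pyAdd (PySem.List.pyGetD g i []) (ordAt w i) 1)) g) grades

-- ===== PORT B =====
-- inner `while run < len(col) and col[run] == c: run += 1`
def innerRun (col : List Char) (c : Char) (run : Nat) : Nat :=
  if h : run < col.length ∧ col.getD run ' ' == c then innerRun col c (run + 1) else run
  termination_by col.length - run
  decreasing_by omega

lemma innerRun_ge (col : List Char) (c : Char) (run : Nat) : run ≤ innerRun col c run := by
  unfold innerRun
  split_ifs with h
  · have := innerRun_ge col c (run + 1); omega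
  · exact le_refl run
  termination_by col.length - run
  decreasing_by omega

-- outer `while col:` loop; `col = col[run:]` is List.drop (run ≥ 1, so the slice shrinks)
def outerRuns (col : List Char) (row : List Int) : List Int :=
  match col with
  | [] => row
  | c :: rest =>
    let run := innerRun (c :: rest) c 1
    outerRuns ((c :: rest).drop run) (pyAdd row ((c.toNat : Int) - 97) (run : Int))
  termination_by col.length
  decreasing_by
    have h1 := innerRun_ge (c :: rest) c 1
    simp only [List.length_drop, List.length_cons]
    omega

def grader_alt (poss_words : List String) : List (List Int) :=
  (PySem.List.pyRange 0 5 1).foldl (fun grades i =>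
    let col := PySem.List.sorted (poss_words.map (fun w => (PySem.Str.pyGet? w i).getD 'a'))
      (fun c => c) false
    let row := outerRuns col (List.replicate 26 (0 : Int))
    grades ++ [row]) []

-- ===== PRECONDITION & SPEC =====
-- Pre_ excludes exactly the inputs where A raises IndexError: a word shorter than 5, or a
-- first-five character below 'G' (code 71) or above 'z' (code 122), whose index misses row[-26..25].
def Pre_grader (poss_words : List String) : Prop :=
  (poss_words.all (fun w => 5 ≤ w.toList.length &&
    (w.toList.take 5).all (fun c => 71 ≤ c.toNat && c.toNat ≤ 122))) = true
instance (poss_words : List String) : Decidable (Pre_grader poss_words) := by unfold Pre_grader; infer_instance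
def pvWitness_grader : List String := (["crane"])

def Spec_grader (poss_words : List String) (out : List (List Int)) : Prop := out = grader_alt poss_words
instance (poss_words : List String) (out : List (List Int)) : Decidable (Spec_grader poss_words out) := by unfold Spec_grader; infer_instance

-- ===== CLAIM (what is proved, stated in full; the proofs are below) =====
def Claim_equal_grader : Prop := ∀ (poss_words : List String), Dom_grader poss_words → Pre_grader poss_words → Spec_grader poss_words (grader poss_words)

-- ===== LEMMAS AND PROOFS =====

-- the resolved row index of a letter (Python's wrap of ord(c)-97 into [0,26))
def rIdx (c : Char) : Nat := (c.toNat - 71) % 26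

def okC (c : Char) : Prop := 71 ≤ c.toNat ∧ c.toNat ≤ 122

def chAt (w : String) (i : Int) : Char := (PySem.Str.pyGet? w i).getD 'a'

-- A's shape: fold (letter, weight) pairs into a 26-cell row
def colRow (l : List (Char × Int)) (row : List Int) : List Int :=
  l.foldl (fun row p => pyAdd row ((p.1.toNat : Int) - 97) p.2) row

lemma pyAdd_ok (row : List Int) (h26 : row.length = 26) (c : Char) (hc : okC c) (v : Int) :
    pyAdd row ((c.toNat : Int) - 97) v = row.set (rIdx c) (row.getD (rIdx c) 0 + v) := by
  obtain ⟨h1, h2⟩ := hc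
  have : PySem.List.pyIdx? row.length ((c.toNat : Int) - 97) = some (rIdx c) := by
    simp only [PySem.List.pyIdx?, h26, rIdx]
    split_ifs with ha hb hc'
    · congr 1; omega
    · omega
    · congr 1; omega
    · omega
  simp [pyAdd, this]

lemma colRow_spec : ∀ (l : List (Char × Int)) (row : List Int), row.length = 26 →
    (∀ p ∈ l, okC p.1) →
    (colRow l row).length = 26 ∧
      ∀ j, j < 26 → (colRow l row).getD j 0
        = row.getD j 0 + ((l.filter (fun p => rIdx p.1 == j)).map (·.2)).sum := by
  intro l
  induction l with
  | nil => intro row h26 _; simp [colRow, h26]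
  | cons p t ih =>
    intro row h26 hok
    have hp := hok p (by simp)
    have hstep : colRow (p :: t) row
        = colRow t (row.set (rIdx p.1) (row.getD (rIdx p.1) 0 + p.2)) := by
      simp [colRow, pyAdd_ok row h26 p.1 hp p.2]
    have h26' : (row.set (rIdx p.1) (row.getD (rIdx p.1) 0 + p.2)).length = 26 := by
      simp [h26]
    obtain ⟨hl, hv⟩ := ih _ h26' (fun q hq => hok q (by simp [hq]))
    refine ⟨by rw [hstep]; exact hl, ?_⟩
    intro j hj
    rw [hstep, hv j hj]
    by_cases hpj : rIdx p.1 = j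
    · have hj' : j < row.length := by omega
      simp [hpj, List.getD_eq_getElem?_getD, List.getElem?_set_self', List.getElem?_eq_getElem hj']
      ring
    · simp [hpj, List.getD_eq_getElem?_getD, List.getElem?_set_ne hpj]

lemma pyRange5 : PySem.List.pyRange 0 5 1 = [0, 1, 2, 3, 4] := by decide

def zRow : List Int := List.replicate 26 0

lemma grader_init :
    (PySem.List.pyRange 0 5 1).foldl (fun g _ => g ++ [List.replicate 26 (0 : Int)]) []
      = [zRow, zRow, zRow, zRow, zRow] := by
  simp [pyRange5, List.foldl, zRow]

lemma A_step (w : String) (r0 r1 r2 r3 r4 : List Int) :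
    (PySem.List.pyRange 0 5 1).foldl (fun g i =>
        PySem.List.pySetD g i (pyAdd (PySem.List.pyGetD g i []) (ordAt w i) 1))
      [r0, r1, r2, r3, r4]
    = [pyAdd r0 (ordAt w 0) 1, pyAdd r1 (ordAt w 1) 1, pyAdd r2 (ordAt w 2) 1,
       pyAdd r3 (ordAt w 3) 1, pyAdd r4 (ordAt w 4) 1] := by
  simp [pyRange5, List.foldl, PySem.List.pyGetD, PySem.List.pyGet?, PySem.List.pySetD,
    PySem.List.pySet?, PySem.List.pyIdx?]

lemma ordAt_eq (w : String) (i : Int) : ordAt w i = ((chAt w i).toNat : Int) - 97 := rfl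

lemma A_fold : ∀ (ws : List String) (r0 r1 r2 r3 r4 : List Int),
    ws.foldl (fun g w =>
        (PySem.List.pyRange 0 5 1).foldl (fun g i =>
          PySem.List.pySetD g i (pyAdd (PySem.List.pyGetD g i []) (ordAt w i) 1)) g)
      [r0, r1, r2, r3, r4]
    = [colRow (ws.map (fun w => (chAt w 0, (1 : Int)))) r0,
       colRow (ws.map (fun w => (chAt w 1, (1 : Int)))) r1,
       colRow (ws.map (fun w => (chAt w 2, (1 : Int)))) r2,
       colRow (ws.map (fun w => (chAt w 3, (1 : Int)))) r3,
       colRow (ws.map (fun w => (chAt w 4, (1 : Int)))) r4] := by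
  intro ws
  induction ws with
  | nil => intro r0 r1 r2 r3 r4; simp [colRow]
  | cons w t ih =>
    intro r0 r1 r2 r3 r4
    rw [List.foldl_cons, A_step, ih]
    simp [colRow, ordAt_eq]

lemma grader_eq_cols (ws : List String) :
    grader ws
    = [colRow (ws.map (fun w => (chAt w 0, (1 : Int)))) zRow,
       colRow (ws.map (fun w => (chAt w 1, (1 : Int)))) zRow,
       colRow (ws.map (fun w => (chAt w 2, (1 : Int)))) zRow,
       colRow (ws.map (fun w => (chAt w 3, (1 : Int)))) zRow,
       colRow (ws.map (fun w => (chAt w 4, (1 : Int)))) zRow] := by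
  unfold grader
  rw [grader_init, A_fold]

-- A's column j value: the weight-1 sum over a filter IS a countP
lemma colRow_ones (chars : List Char) (hok : ∀ c ∈ chars, okC c) :
    (colRow (chars.map (fun c => (c, (1 : Int)))) zRow).length = 26 ∧
      ∀ j, j < 26 → (colRow (chars.map (fun c => (c, (1 : Int)))) zRow).getD j 0
        = (chars.countP (fun c => rIdx c == j) : Int) := by
  obtain ⟨hl, hv⟩ := colRow_spec (chars.map (fun c => (c, (1 : Int)))) zRow (by simp [zRow])
    (by intro p hp; obtain ⟨c, hc, rfl⟩ := List.mem_map.mp hp; exact hok c hc)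
  refine ⟨hl, fun j hj => ?_⟩
  rw [hv j hj]
  have hz : zRow.getD j 0 = 0 := by
    unfold zRow
    rw [List.getD_eq_getElem?_getD, List.getElem?_replicate]
    simp [hj]
  rw [hz, zero_add, List.filter_map]
  simp [List.map_map, Function.comp_def, List.countP_eq_length_filter]

-- innerRun counts the contiguous equal prefix from index `run`
lemma innerRun_eq (col : List Char) (c : Char) (run : Nat) :
    innerRun col c run = run + ((col.drop run).takeWhile (fun x => x == c)).length := by
  unfold innerRun
  split_ifs with h
  · obtain ⟨hlt, heq⟩ := h
    have ih := innerRun_eq col c (run + 1)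
    have hdrop : col.drop run = col.getD run ' ' :: col.drop (run + 1) := by
      rw [List.getD_eq_getElem?_getD, List.getElem?_eq_getElem hlt, Option.getD_some]
      exact List.drop_eq_getElem_cons hlt
    rw [ih, hdrop, List.takeWhile_cons_of_pos (p := fun x => x == c) heq]
    simp only [List.length_cons]
    omega
  · rcases Nat.lt_or_ge run col.length with hlt | hge
    · have heq : ¬ (col.getD run ' ' == c) := fun hc => h ⟨hlt, hc⟩
      have hdrop : col.drop run = col.getD run ' ' :: col.drop (run + 1) := by
        rw [List.getD_eq_getElem?_getD, List.getElem?_eq_getElem hlt, Option.getD_some]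
        exact List.drop_eq_getElem_cons hlt
      rw [hdrop, List.takeWhile_cons_of_neg (p := fun x => x == c) (by simpa using heq)]
      simp
    · rw [List.drop_eq_nil_of_le hge]; simp
  termination_by col.length - run
  decreasing_by omega

-- every element of the takeWhile prefix equals c
lemma mem_takeWhile_eq (l : List Char) (c x : Char) (hx : x ∈ l.takeWhile (fun y => y == c)) :
    x = c := by
  have := List.mem_takeWhile_imp hx
  simpa using this

lemma countP_all_eq (l : List Char) (c : Char) (hall : ∀ x ∈ l, x = c) (p : Char → Bool) :
    l.countP p = if p c then l.length else 0 := by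
  induction l with
  | nil => simp
  | cons x t ih =>
    have hx := hall x (by simp)
    rw [List.countP_cons, ih (fun y hy => hall y (by simp [hy])), hx]
    by_cases hp : p c = true <;> simp [hp]

-- the run-length scan computes exactly the per-class counts
lemma outerRuns_spec : ∀ (col : List Char) (row : List Int), row.length = 26 →
    (∀ c ∈ col, okC c) →
    (outerRuns col row).length = 26 ∧
      ∀ j, j < 26 → (outerRuns col row).getD j 0
        = row.getD j 0 + (col.countP (fun c => rIdx c == j) : Int) := by
  intro col row
  induction col, row using outerRuns.induct with
  | case1 row =>
    intro h26 _
    refine ⟨by simpa [outerRuns] using h26, fun j hj => by simp [outerRuns]⟩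
  | case2 row c rest run ih =>
    intro h26 hok
    have hstep : outerRuns (c :: rest) row
        = outerRuns ((c :: rest).drop (innerRun (c :: rest) c 1))
            (pyAdd row ((c.toNat : Int) - 97) ((innerRun (c :: rest) c 1 : Nat) : Int)) := by
      conv_lhs => rw [outerRuns]
    set t := (rest.takeWhile (fun x => x == c)).length with ht
    have hrun : innerRun (c :: rest) c 1 = 1 + t := by
      have hd1 : (c :: rest).drop 1 = rest := rfl
      rw [innerRun_eq, hd1]
    have htle : t ≤ rest.length := (List.takeWhile_sublist _).length_le
    have hdrop1 : (c :: rest).drop (1 + t) = rest.drop t := by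
      rw [Nat.add_comm, List.drop_succ_cons]
    have hcok : okC c := hok c (by simp)
    have hrow' : (pyAdd row ((c.toNat : Int) - 97) (((1 + t : Nat) : Nat) : Int)).length = 26 := by
      rw [pyAdd_ok row h26 c hcok]; simp [h26]
    have hokrest : ∀ x ∈ rest.drop t, okC x :=
      fun x hx => hok x (by simp [List.mem_of_mem_drop hx])
    have hrun' : run = 1 + t := hrun
    rw [hrun', hdrop1] at ih
    rw [hrun, hdrop1] at hstep
    obtain ⟨hl, hv⟩ := ih hrow' hokrest
    rw [hstep]
    refine ⟨hl, fun j hj => ?_⟩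
    rw [hv j hj, pyAdd_ok row h26 c hcok]
    have hsplit : rest = rest.takeWhile (fun x => x == c) ++ rest.dropWhile (fun x => x == c) :=
      (List.takeWhile_append_dropWhile).symm
    have hdw : rest.drop t = rest.dropWhile (fun x => x == c) := by
      conv_lhs => rw [hsplit]
      rw [ht, List.drop_left]
    have hcount : ((c :: rest).countP (fun x => rIdx x == j) : Int)
        = (if rIdx c == j then ((1 + t : Nat) : Int) else 0)
          + ((rest.drop t).countP (fun x => rIdx x == j) : Int) := by
      rw [List.countP_cons]
      conv_lhs => rw [hsplit]
      rw [List.countP_append, hdw,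
        countP_all_eq _ c (fun x hx => mem_takeWhile_eq rest c x hx) _]
      by_cases hp : (rIdx c == j) = true
      · simp only [hp, if_true, ht]
        push_cast
        ring
      · rw [Bool.not_eq_true] at hp
        simp only [hp]
        push_cast
        ring
    rw [hcount]
    by_cases hpj : rIdx c = j
    · have hj' : j < row.length := by omega
      subst hpj
      simp [List.getD_eq_getElem?_getD, List.getElem?_set_self', List.getElem?_eq_getElem hj']
      ring
    · have hb : (rIdx c == j) = false := by simp [hpj]
      simp [hb, List.getD_eq_getElem?_getD, List.getElem?_set_ne hpj]

-- B unfolds to the five per-position run-scanned rows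
def colOf (ws : List String) (i : Int) : List Char := ws.map (fun w => chAt w i)

lemma grader_alt_eq_rows (ws : List String) :
    grader_alt ws
      = [outerRuns (PySem.List.sorted (colOf ws 0) (fun c => c) false) zRow,
         outerRuns (PySem.List.sorted (colOf ws 1) (fun c => c) false) zRow,
         outerRuns (PySem.List.sorted (colOf ws 2) (fun c => c) false) zRow,
         outerRuns (PySem.List.sorted (colOf ws 3) (fun c => c) false) zRow,
         outerRuns (PySem.List.sorted (colOf ws 4) (fun c => c) false) zRow] := by
  unfold grader_alt
  rw [pyRange5]
  simp [List.foldl, colOf, chAt, zRow]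

lemma okC_chAt (w : String) (h5 : 5 ≤ w.toList.length)
    (hw : ∀ c ∈ w.toList.take 5, 71 ≤ c.toNat ∧ c.toNat ≤ 122)
    (i : Int) (h0 : 0 ≤ i) (h1 : i < 5) : okC (chAt w i) := by
  have h5c : (5 : Int) ≤ (w.toList.length : Int) := by exact_mod_cast h5
  have hlen : i < (w.toList.length : Int) := by omega
  have : chAt w i = w.toList[i.toNat] := by
    show (PySem.List.pyGet? w.toList i).getD 'a' = _
    exact PySem.List.pyGetD_eq_getElem w.toList 'a' h0 hlen
  rw [this]
  refine hw _ ?_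
  have h5' : i.toNat < 5 := by omega
  have : w.toList[i.toNat] = (w.toList.take 5)[i.toNat]'(by
    rw [List.length_take]; omega) := (List.getElem_take ..).symm
  rw [this]
  exact List.getElem_mem _

-- one position: A's tallied row = B's sorted run-scanned row
lemma col_eq (chars : List Char) (hok : ∀ c ∈ chars, okC c) :
    colRow (chars.map (fun c => (c, (1 : Int)))) zRow
      = outerRuns (PySem.List.sorted chars (fun c => c) false) zRow := by
  have hperm : (PySem.List.sorted chars (fun c => c) false).Perm chars :=
    PySem.List.sorted_perm chars (fun c => c) false
  have hoks : ∀ c ∈ PySem.List.sorted chars (fun c => c) false, okC c :=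
    fun c hc => hok c (hperm.mem_iff.mp hc)
  obtain ⟨hl1, hv1⟩ := colRow_ones chars hok
  obtain ⟨hl2, hv2⟩ := outerRuns_spec (PySem.List.sorted chars (fun c => c) false) zRow
    (by simp [zRow]) hoks
  apply List.ext_getElem (by omega)
  intro j hj1 hj2
  have hj : j < 26 := by omega
  have e1 := hv1 j hj
  have e2 := hv2 j hj
  rw [List.getD_eq_getElem?_getD, List.getElem?_eq_getElem hj1] at e1
  rw [List.getD_eq_getElem?_getD, List.getElem?_eq_getElem hj2] at e2
  simp only [Option.getD_some] at e1 e2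
  rw [e1, e2]
  have hz : zRow.getD j 0 = 0 := by
    unfold zRow
    rw [List.getD_eq_getElem?_getD, List.getElem?_replicate]
    simp [hj]
  rw [hz, zero_add, hperm.countP_eq]

-- ===== VERDICT (by name: the statement is the Claim_ definition above) =====
theorem grader_spec : Claim_equal_grader := by
  intro ws _ hpre
  show grader ws = grader_alt ws
  rw [grader_eq_cols, grader_alt_eq_rows]
  have hok : ∀ (i : Int), 0 ≤ i → i < 5 → ∀ c ∈ colOf ws i, okC c := by
    intro i h0 h1 c hc
    obtain ⟨w, hw, rfl⟩ := List.mem_map.mp hc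
    have hpre' := List.all_eq_true.mp hpre w hw
    simp only [Bool.and_eq_true, decide_eq_true_eq] at hpre'
    obtain ⟨h5, hch⟩ := hpre'
    refine okC_chAt w h5 ?_ i h0 h1
    intro c hc
    have hcc := List.all_eq_true.mp hch c hc
    simp only [Bool.and_eq_true, decide_eq_true_eq] at hcc
    exact hcc
  have hone : ∀ (i : Int), 0 ≤ i → i < 5 →
      colRow (ws.map (fun w => (chAt w i, (1 : Int)))) zRow
        = outerRuns (PySem.List.sorted (colOf ws i) (fun c => c) false) zRow := by
    intro i h0 h1
    have := col_eq (colOf ws i) (hok i h0 h1)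
    simpa [colOf, List.map_map, Function.comp_def] using this
  rw [hone 0 (by omega) (by omega), hone 1 (by omega) (by omega), hone 2 (by omega) (by omega),
      hone 3 (by omega) (by omega), hone 4 (by omega) (by omega)]
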